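/- GENERATED by tools/from_farm_form.py from prooffarm-gif/accepted/GifAddExtensionBlock.3/Proof.lean (a worked proof of the farm's unit `GifAddExtensionBlock.3`,
   accepted by the verdict) — do not edit. -/
import Gif.Spec.Units.GifAddExtensionBlock_3
import Gif.Spec.Proved.GifAddExtensionBlock_3_Lemmas

open X86 X86.User Asan ProgX.Base ProgX.Base.Spec Gif.Spec

/-- Segment 3 of `GifAddExtensionBlock` (107C05H … 107C24H, 107C5CH … 107C6AH; gifalloc.c l.256-264): from `AfterBytes` (the new block
is counted, `rbp = ep->Bytes`) to `Done`: `Bytes == NULL` → GIF_ERROR with nothing written; otherwise `memcpy(Bytes, ExtData,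
Len)` into the new data object, GIF_OK. The case split is the assertion's own (`AfterBytes.rbp`), before the walk: each walk has
one live arm (the test `ExtData != NULL` is always true: `ExtData` points into `pv.Buf`). -/
theorem Gif.Spec.Proved.GifAddExtensionBlock_3_ok : Gif.Spec.GifAddExtensionBlock_3.Statement := by
  intro Lay hLay μ hμ u₀ hcode h_memcpy H rest frames F R len Hc Fc e ret v hat
  rcases hat.rbp with hnull | hdata
  · -- 107C05H → 107C5CH → 107C4DH: GIF_ERROR
    exact Gif.Spec.GifAddExtensionBlock_3.gab3_null Lay hLay μ hμ u₀ hcode H rest frames F R len Hc Fc e ret v hat hnull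
  · -- 107C05H → `memcpy` → 107C4DH: GIF_OK
    exact Gif.Spec.GifAddExtensionBlock_3.gab3_copy Lay hLay μ hμ u₀ hcode h_memcpy H rest frames F R len Hc Fc e ret v hat hdata
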